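-- pv_equiv track=rewrite | github.com/RiemanNClav/chatbot_facebook | chatbot/horarios/horario.py | resumir_horarios
-- ===== SOURCE A (Python) =====
-- def resumir_horarios(horarios):
--         horario_habitual='HORARIO HABITUAL\n'
--         dias_ordenados = list(horarios.items())
--         resumen = []
--         inicio = dias_ordenados[0][0]
--         anterior_horario = dias_ordenados[0][1]
--         for i in range(1, len(dias_ordenados)):
--                 dia, horario = dias_ordenados[i]
--                 if horario != anterior_horario:
--                         if inicio == dias_ordenados[i-1][0]:
--                                 resumen.append(f"{inicio} de {anterior_horario}")
--                         else:
--                                 resumen.append(f"{inicio} a {dias_ordenados[i-1][0]} de {anterior_horario}")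
--
--                         inicio = dia
--
--                 anterior_horario = horario
--
--         if inicio == dias_ordenados[-1][0]:
--                 resumen.append(f"{inicio} de {anterior_horario}")
--         else:
--                 resumen.append(f"{inicio} a {dias_ordenados[-1][0]} de {anterior_horario}")
--
--
--         for r in resumen:
--                 horario_habitual += r + '\n'
--
--         return horario_habitual
-- ===== SOURCE B (Python) =====
-- def resumir_horarios(horarios):
--     items = list(horarios.items())
--     n = len(items)
--     lineas = []
--     i = 0
--     while i < n:
--         j = i + 1
--         while j < n and items[j][1] == items[i][1]:
--             j += 1
--         inicio = items[i][0]
--         fin = items[j - 1][0]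
--         horario = items[i][1]
--         if inicio == fin:
--             lineas.append(f"{inicio} de {horario}")
--         else:
--             lineas.append(f"{inicio} a {fin} de {horario}")
--         i = j
--     resultado = 'HORARIO HABITUAL\n'
--     for linea in lineas:
--         resultado += linea + '\n'
--     return resultado
-- ===== Notes on version B (the rewrite author's own statement) =====
-- stated objective: simpler
-- what changed: A streams with a four-variable state machine (resumen/inicio/anterior) over indices i, i-1 and -1, emitting a line at each schedule change; B is a two-pointer scan whose outer loop finds each maximal run of equal schedules with an inner scan and formats that run directly.
import Mathlib
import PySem

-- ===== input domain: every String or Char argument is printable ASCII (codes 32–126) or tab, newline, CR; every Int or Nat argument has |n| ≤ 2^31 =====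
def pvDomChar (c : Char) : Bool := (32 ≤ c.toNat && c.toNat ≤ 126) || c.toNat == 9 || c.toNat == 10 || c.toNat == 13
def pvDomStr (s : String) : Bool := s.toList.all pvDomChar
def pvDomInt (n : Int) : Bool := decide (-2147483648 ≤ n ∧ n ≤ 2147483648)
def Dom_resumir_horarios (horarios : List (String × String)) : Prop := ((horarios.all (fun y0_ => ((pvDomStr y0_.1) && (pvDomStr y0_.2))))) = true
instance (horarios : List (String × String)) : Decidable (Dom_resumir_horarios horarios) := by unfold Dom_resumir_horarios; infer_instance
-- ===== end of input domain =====

-- B replaces A's streaming four-variable state machine by a two-pointer scan: the outer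
-- loop finds each maximal run of equal schedules and formats it directly ("simpler", not faster).

-- ===== PORT A =====
-- loop body of A's `for i in range(1, len(dias_ordenados))`, taking dias[i-1], dias[i] and
-- the state (resumen, inicio, anterior_horario); kept as a named helper so the loop lemmas
-- below can speak about it.
def pvPasoA (prev cur : String × String) (st : List String × String × String) :
    List String × String × String :=
  if cur.2 ≠ st.2.2 then
    (st.1 ++ [if st.2.1 == prev.1 then st.2.1 ++ " de " ++ st.2.2
              else st.2.1 ++ " a " ++ prev.1 ++ " de " ++ st.2.2],
     cur.1, cur.2)
  else (st.1, st.2.1, cur.2)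

def resumir_horarios (horarios : List (String × String)) : String :=
  let dias := horarios
  let d : String × String := ("", "")   -- default only for out-of-range indexing (excluded by Pre_)
  let st0 : List String × String × String :=
    ([], (PySem.List.pyGetD dias 0 d).1, (PySem.List.pyGetD dias 0 d).2)
  let st := (PySem.List.pyRange 1 (dias.length : Int) 1).foldl
    (fun st i => pvPasoA (PySem.List.pyGetD dias (i - 1) d) (PySem.List.pyGetD dias i d) st) st0
  let ultimo := (PySem.List.pyGetD dias (-1) d).1
  let resumen := st.1 ++
    [if st.2.1 == ultimo then st.2.1 ++ " de " ++ st.2.2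
     else st.2.1 ++ " a " ++ ultimo ++ " de " ++ st.2.2]
  resumen.foldl (fun acc r => acc ++ r ++ "\n") "HORARIO HABITUAL\n"

-- ===== PORT B =====
-- inner `while j < n and items[j][1] == items[i][1]` of Source B (h is items[i][1])
def pvBuscarFin (items : List (String × String)) (h : String) (j : ℕ) : ℕ :=
  if hc : j < items.length ∧ (PySem.List.pyGetD items (j : Int) ("", "")).2 = h then
    pvBuscarFin items h (j + 1)
  else j
termination_by items.length - j
decreasing_by omega

-- cited by pvLineas' decreasing_by (the outer loop advances: i < j)
theorem le_pvBuscarFin (items : List (String × String)) (h : String) (j : ℕ) :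
    j ≤ pvBuscarFin items h j := by
  fun_induction pvBuscarFin items h j <;> omega

-- outer `while i < n` of Source B, producing the list `lineas`
def pvLineas (items : List (String × String)) (i : ℕ) : List String :=
  if _hi : i < items.length then
    let j := pvBuscarFin items (PySem.List.pyGetD items (i : Int) ("", "")).2 (i + 1)
    let inicio := (PySem.List.pyGetD items (i : Int) ("", "")).1
    let fin := (PySem.List.pyGetD items ((j : Int) - 1) ("", "")).1
    let horario := (PySem.List.pyGetD items (i : Int) ("", "")).2
    (if inicio == fin then inicio ++ " de " ++ horario
     else inicio ++ " a " ++ fin ++ " de " ++ horario) :: pvLineas items j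
  else []
termination_by items.length - i
decreasing_by
  have := le_pvBuscarFin items (PySem.List.pyGetD items (i : Int) ("", "")).2 (i + 1)
  omega

def resumir_horarios_alt (horarios : List (String × String)) : String :=
  (pvLineas horarios 0).foldl (fun acc linea => acc ++ linea ++ "\n") "HORARIO HABITUAL\n"

-- ===== PRECONDITION & SPEC =====
-- Pre_ excludes only the empty dict, on which A raises IndexError (dias_ordenados[0]).
def Pre_resumir_horarios (horarios : List (String × String)) : Prop := horarios ≠ []
instance (horarios : List (String × String)) : Decidable (Pre_resumir_horarios horarios) := by
  unfold Pre_resumir_horarios; infer_instance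

def pvWitness_resumir_horarios : (List (String × String)) := [("Lunes", "9-17")]

def Spec_resumir_horarios (horarios : List (String × String)) (out : String) : Prop :=
  out = resumir_horarios_alt horarios
instance (horarios : List (String × String)) (out : String) :
    Decidable (Spec_resumir_horarios horarios out) := by unfold Spec_resumir_horarios; infer_instance

-- ===== CLAIM (what is proved, stated in full; the proofs are below) =====
def Claim_equal_resumir_horarios : Prop :=
  ∀ (horarios : List (String × String)), Dom_resumir_horarios horarios →
    Pre_resumir_horarios horarios → Spec_resumir_horarios horarios (resumir_horarios horarios)

-- ===== LEMMAS AND PROOFS =====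

-- A's loop as structural recursion: p is dias[i-1], the rest of the list is still to scan.
def pvChainA : (String × String) → List (String × String) →
    (List String × String × String) → List String × String × String
  | _, [], st => st
  | p, y :: t, st => pvChainA y t (pvPasoA p y st)

def pvFmt (a b h : String) : String :=
  if a == b then a ++ " de " ++ h else a ++ " a " ++ b ++ " de " ++ h

def pvLastFst (g : List (String × String)) : String := (g.getLast?.getD ("", "")).1

-- A's emitted lines, recursively: inicio is the current run's first day, x the last item seen.
def pvRunsOf (inicio : String) (x : String × String) : List (String × String) → List String
  | [] => [pvFmt inicio x.1 x.2]
  | y :: t => if y.2 ≠ x.2 then pvFmt inicio x.1 x.2 :: pvRunsOf y.1 y t else pvRunsOf inicio y t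

-- index elimination: the fold over range(j+1, len xs) with accesses xs[i-1], xs[i] is pvChainA.
theorem pvFold_eq_chain (xs : List (String × String)) :
    ∀ (ys : List (String × String)) (j : ℕ) (p : String × String)
      (st : List String × String × String),
      xs.drop j = p :: ys →
      (PySem.List.pyRange ((j : Int) + 1) (xs.length : Int) 1).foldl
          (fun st i => pvPasoA (PySem.List.pyGetD xs (i - 1) ("", ""))
            (PySem.List.pyGetD xs i ("", "")) st) st
        = pvChainA p ys st := by
  intro ys
  induction ys with
  | nil =>
    intro j p st hdrop
    have hlen : xs.length = j + 1 := by
      have := congrArg List.length hdrop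
      simp [List.length_drop] at this
      omega
    rw [PySem.List.pyRange_one_eq_nil (by omega : (xs.length : Int) ≤ (j : Int) + 1)]
    rfl
  | cons y t ih =>
    intro j p st hdrop
    have hlen : j + 2 ≤ xs.length := by
      have := congrArg List.length hdrop
      simp [List.length_drop] at this
      omega
    have hdrop' : xs.drop (j + 1) = y :: t := by
      have : (xs.drop j).drop 1 = y :: t := by rw [hdrop]; rfl
      rwa [List.drop_drop] at this
    have hp : xs[j]? = some p := by
      have : (xs.drop j)[0]? = some p := by rw [hdrop]; rfl
      rwa [List.getElem?_drop, Nat.add_zero] at this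
    have hy : xs[j + 1]? = some y := by
      have : (xs.drop (j + 1))[0]? = some y := by rw [hdrop']; rfl
      rwa [List.getElem?_drop, Nat.add_zero] at this
    rw [PySem.List.pyRange_one_cons (by omega : (j : Int) + 1 < (xs.length : Int))]
    rw [List.foldl_cons]
    have e1 : PySem.List.pyGetD xs ((j : Int) + 1 - 1) ("", "") = p := by
      have : (j : Int) + 1 - 1 = ((j : Nat) : Int) := by omega
      rw [this, PySem.List.pyGetD_natCast, List.getD, hp]; rfl
    have e2 : PySem.List.pyGetD xs ((j : Int) + 1) ("", "") = y := by
      have : (j : Int) + 1 = (((j + 1 : Nat)) : Int) := by omega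
      rw [this, PySem.List.pyGetD_natCast, List.getD, hy]; rfl
    rw [e1, e2]
    have : ((j : Int) + 1 + 1) = (((j + 1 : Nat) : Int) + 1) := by omega
    rw [this, ih (j + 1) y (pvPasoA p y st) hdrop']
    rfl

-- flushing the final line after the chain yields pvRunsOf.
theorem pvChain_flush :
    ∀ (t : List (String × String)) (p : String × String) (res : List String) (inicio : String),
      (pvChainA p t (res, inicio, p.2)).1 ++
          [pvFmt (pvChainA p t (res, inicio, p.2)).2.1 (pvLastFst (p :: t))
            (pvChainA p t (res, inicio, p.2)).2.2]
        = res ++ pvRunsOf inicio p t := by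
  intro t
  induction t with
  | nil => intro p res inicio; simp [pvChainA, pvRunsOf, pvLastFst, pvFmt]
  | cons y t ih =>
    intro p res inicio
    have hlast : pvLastFst (p :: y :: t) = pvLastFst (y :: t) := by
      simp [pvLastFst]
    rw [hlast]
    by_cases h : y.2 = p.2
    · have hstep : pvPasoA p y (res, inicio, p.2) = (res, inicio, y.2) := by
        simp [pvPasoA, h]
      have hc : pvChainA p (y :: t) (res, inicio, p.2) = pvChainA y t (res, inicio, y.2) := by
        simp [pvChainA, hstep]
      rw [hc, ih y res inicio]
      simp [pvRunsOf, h]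
    · have hstep : pvPasoA p y (res, inicio, p.2) =
          (res ++ [pvFmt inicio p.1 p.2], y.1, y.2) := by
        simp [pvPasoA, pvFmt, h]
      have hc : pvChainA p (y :: t) (res, inicio, p.2)
          = pvChainA y t (res ++ [pvFmt inicio p.1 p.2], y.1, y.2) := by
        simp [pvChainA, hstep]
      rw [hc, ih y (res ++ [pvFmt inicio p.1 p.2]) y.1]
      simp [pvRunsOf, h]

def pvRunsTop : List (String × String) → List String
  | [] => []
  | x :: t => pvRunsOf x.1 x t

-- one step of pvRunsOf consumes exactly one maximal run.
theorem pvRuns_eq :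
    ∀ (t : List (String × String)) (x : String × String) (inicio : String),
      pvRunsOf inicio x t
        = pvFmt inicio (pvLastFst (x :: t.takeWhile (fun p => p.2 == x.2))) x.2 ::
            pvRunsTop (t.dropWhile (fun p => p.2 == x.2)) := by
  intro t
  induction t with
  | nil => intro x inicio; simp [pvRunsOf, pvRunsTop, pvLastFst]
  | cons y t ih =>
    intro x inicio
    by_cases h : y.2 = x.2
    · have hb : (y.2 == x.2) = true := by simp [h]
      simp only [List.takeWhile_cons, List.dropWhile_cons, hb, if_true]
      have hruns : pvRunsOf inicio x (y :: t) = pvRunsOf inicio y t := by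
        simp [pvRunsOf, h]
      rw [hruns, ih y inicio]
      have hpred : (fun p : String × String => p.2 == y.2)
          = (fun p : String × String => p.2 == x.2) := by
        funext p; rw [h]
      rw [hpred]
      have hl : pvLastFst (y :: t.takeWhile (fun p => p.2 == x.2))
          = pvLastFst (x :: y :: t.takeWhile (fun p => p.2 == x.2)) := by
        simp [pvLastFst]
      rw [hl, h]
    · have hb : (y.2 == x.2) = false := by simp [h]
      simp only [List.takeWhile_cons, List.dropWhile_cons, hb, if_false, Bool.false_eq_true]
      have hruns : pvRunsOf inicio x (y :: t) = pvFmt inicio x.1 x.2 :: pvRunsOf y.1 y t := by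
        simp [pvRunsOf, h]
      rw [hruns]
      simp [pvRunsTop, pvLastFst]

-- the inner while stops after exactly the takeWhile-prefix of equal schedules.
theorem pvBuscarFin_eq (items : List (String × String)) (h : String) :
    ∀ (t : List (String × String)) (j : ℕ), items.drop j = t →
      pvBuscarFin items h j = j + (t.takeWhile (fun p => p.2 == h)).length := by
  intro t
  induction t with
  | nil =>
    intro j hdrop
    have hlen : items.length ≤ j := by
      have := congrArg List.length hdrop
      simp [List.length_drop] at this
      omega
    rw [pvBuscarFin, dif_neg (by omega)]
    simp
  | cons y t ih =>
    intro j hdrop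
    have hj : j < items.length := by
      have := congrArg List.length hdrop
      simp [List.length_drop] at this
      omega
    have hy : items[j]? = some y := by
      have : (items.drop j)[0]? = some y := by rw [hdrop]; rfl
      rwa [List.getElem?_drop, Nat.add_zero] at this
    have hgety : PySem.List.pyGetD items (j : Int) ("", "") = y := by
      rw [PySem.List.pyGetD_natCast, List.getD, hy]; rfl
    have hdrop' : items.drop (j + 1) = t := by
      have : (items.drop j).drop 1 = t := by rw [hdrop]; rfl
      rwa [List.drop_drop] at this
    by_cases hc : y.2 = h
    · rw [pvBuscarFin, dif_pos ⟨hj, by rw [hgety]; exact hc⟩]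
      rw [ih (j + 1) hdrop']
      have hb : (y.2 == h) = true := by simp [hc]
      simp only [List.takeWhile_cons, hb, if_true, List.length_cons]
      omega
    · rw [pvBuscarFin, dif_neg (by rw [hgety]; exact fun hh => hc hh.2)]
      have hb : (y.2 == h) = false := by simp [hc]
      simp only [List.takeWhile_cons, hb, if_false, Bool.false_eq_true, List.length_nil]
      omega

-- B's outer loop produces exactly pvRunsOf, run by run.
theorem pvLineas_eq (items : List (String × String)) :
    ∀ (n i : ℕ) (x : String × String) (t : List (String × String)),
      items.length - i ≤ n → items.drop i = x :: t →
      pvLineas items i = pvRunsOf x.1 x t := by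
  intro n
  induction n with
  | zero =>
    intro i x t hn hdrop
    have := congrArg List.length hdrop
    simp [List.length_drop] at this
    omega
  | succ n ih =>
    intro i x t hn hdrop
    have hi : i < items.length := by
      have := congrArg List.length hdrop
      simp [List.length_drop] at this
      omega
    have hx : items[i]? = some x := by
      have : (items.drop i)[0]? = some x := by rw [hdrop]; rfl
      rwa [List.getElem?_drop, Nat.add_zero] at this
    have hgetx : PySem.List.pyGetD items (i : Int) ("", "") = x := by
      rw [PySem.List.pyGetD_natCast, List.getD, hx]; rfl
    have hdrop1 : items.drop (i + 1) = t := by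
      have : (items.drop i).drop 1 = t := by rw [hdrop]; rfl
      rwa [List.drop_drop] at this
    set tw := t.takeWhile (fun p => p.2 == x.2) with htw
    set dw := t.dropWhile (fun p => p.2 == x.2) with hdw
    have hbuscar : pvBuscarFin items x.2 (i + 1) = i + 1 + tw.length :=
      pvBuscarFin_eq items x.2 t (i + 1) hdrop1
    have htdw : t = tw ++ dw := (List.takeWhile_append_dropWhile).symm
    -- items[j-1] is the last element of the run x :: tw
    have hlastidx : items[i + tw.length]? = (x :: tw).getLast? := by
      have h1 : items[i + tw.length]? = (items.drop i)[tw.length]? := by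
        rw [List.getElem?_drop]
      rw [h1, hdrop, htdw]
      have h2 : (x :: (tw ++ dw))[tw.length]? = ((x :: tw) ++ dw)[tw.length]? := by rfl
      rw [h2, List.getElem?_append_left (by simp)]
      rw [List.getLast?_eq_getElem?]
      simp
    have hgetfin : PySem.List.pyGetD items (((i + 1 + tw.length : ℕ) : Int) - 1) ("", "")
        = (x :: tw).getLast?.getD ("", "") := by
      have : ((i + 1 + tw.length : ℕ) : Int) - 1 = ((i + tw.length : ℕ) : Int) := by
        push_cast; omega
      rw [this, PySem.List.pyGetD_natCast, List.getD, hlastidx]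
    have hdropj : items.drop (i + 1 + tw.length) = dw := by
      have : (items.drop (i + 1)).drop tw.length = items.drop (i + 1 + tw.length) := by
        rw [List.drop_drop]
      rw [← this, hdrop1, htdw, List.drop_left]
    have htail : pvLineas items (i + 1 + tw.length) = pvRunsTop dw := by
      cases hdw2 : dw with
      | nil =>
        have hlen2 : items.length ≤ i + 1 + tw.length := by
          have := congrArg List.length hdropj
          rw [hdw2] at this
          simp [List.length_drop] at this
          omega
        rw [pvLineas, dif_neg (by omega)]
        simp [pvRunsTop]
      | cons y t2 =>
        have : items.drop (i + 1 + tw.length) = y :: t2 := by rw [hdropj, hdw2]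
        rw [ih (i + 1 + tw.length) y t2 (by omega) this]
        simp [pvRunsTop]
    rw [pvLineas, dif_pos hi, hgetx, hbuscar]
    simp only
    rw [hgetfin, htail]
    rw [pvRuns_eq t x x.1]
    rw [← htw, ← hdw]
    rfl
-- ===== VERDICT (by name: the statement is the Claim_ definition above) =====
theorem resumir_horarios_spec : Claim_equal_resumir_horarios := by
  intro horarios _ hpre
  unfold Spec_resumir_horarios
  match horarios, hpre with
  | x :: t, _ =>
    show (let dias := x :: t
          let d : String × String := ("", "")
          let st0 : List String × String × String :=
            ([], (PySem.List.pyGetD dias 0 d).1, (PySem.List.pyGetD dias 0 d).2)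
          let st := (PySem.List.pyRange 1 (dias.length : Int) 1).foldl
            (fun st i => pvPasoA (PySem.List.pyGetD dias (i - 1) d)
              (PySem.List.pyGetD dias i d) st) st0
          let ultimo := (PySem.List.pyGetD dias (-1) d).1
          let resumen := st.1 ++
            [if st.2.1 == ultimo then st.2.1 ++ " de " ++ st.2.2
             else st.2.1 ++ " a " ++ ultimo ++ " de " ++ st.2.2]
          resumen.foldl (fun acc r => acc ++ r ++ "\n") "HORARIO HABITUAL\n")
        = resumir_horarios_alt (x :: t)
    simp only
    have hget0 : PySem.List.pyGetD (x :: t) 0 ("", "") = x := by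
      simp [PySem.List.pyGetD, PySem.List.pyGet?, PySem.List.pyIdx?]
    have hchain := pvFold_eq_chain (x :: t) t 0 x
      ([], (PySem.List.pyGetD (x :: t) 0 ("", "")).1, (PySem.List.pyGetD (x :: t) 0 ("", "")).2)
      (by simp)
    have h01 : ((0 : ℕ) : Int) + 1 = (1 : Int) := by norm_num
    rw [h01] at hchain
    rw [hchain, hget0]
    have hlast : (PySem.List.pyGetD (x :: t) (-1) ("", "")).1 = pvLastFst (x :: t) := by
      simp [PySem.List.pyGetD, PySem.List.pyGet?_neg_one, pvLastFst]
    have hfmt : (if (pvChainA x t ([], x.1, x.2)).2.1 == (PySem.List.pyGetD (x :: t) (-1) ("", "")).1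
          then (pvChainA x t ([], x.1, x.2)).2.1 ++ " de " ++ (pvChainA x t ([], x.1, x.2)).2.2
          else (pvChainA x t ([], x.1, x.2)).2.1 ++ " a "
            ++ (PySem.List.pyGetD (x :: t) (-1) ("", "")).1 ++ " de "
            ++ (pvChainA x t ([], x.1, x.2)).2.2)
        = pvFmt (pvChainA x t ([], x.1, x.2)).2.1 (pvLastFst (x :: t))
            (pvChainA x t ([], x.1, x.2)).2.2 := by
      rw [hlast]; rfl
    rw [hfmt]
    rw [pvChain_flush t x [] x.1]
    -- B side
    unfold resumir_horarios_alt
    rw [pvLineas_eq (x :: t) (x :: t).length 0 x t (by omega) (by simp)]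
    rfl
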